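-- pv_equiv track=rewrite | github.com/Nguyenthang2292/Sovereign-IQ | modules/hmm/core/high_order.py | decode_expanded_state
-- ===== SOURCE A (Python) =====
-- from typing import List, Optional, Tuple, TYPE_CHECKING
--
-- N_BASE_STATES = 3
--
-- def decode_expanded_state(expanded_state: int, order: int, n_base_states: int = N_BASE_STATES) -> Tuple[int, ...]:
--     """
--     Decode an expanded state back to its constituent base states.
--
--     Args:
--         expanded_state: The expanded state index
--         order: Order of the HMM (k)
--         n_base_states: Number of base states (default: 3)
--
--     Returns:
--         Tuple of k base states
--     """
--     states = []
--     remaining = expanded_state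
--     for i in range(order):
--         power = n_base_states ** (order - 1 - i)
--         state = remaining // power
--         states.append(state)
--         remaining = remaining % power
--     return tuple(states)
-- ===== SOURCE B (Python) =====
-- def decode_expanded_state(expanded_state: int, order: int, n_base_states: int = 3):
--     """Decode an expanded state into its tuple of base states.
--
--     Standard base conversion: divmod peels digits off the least-significant
--     end; the most significant position receives whatever quotient remains,
--     so the digits always recombine exactly to expanded_state.
--     """
--     if order <= 0:
--         return ()
--     digits = []
--     remaining = expanded_state
--     for _ in range(order - 1):
--         remaining, digit = divmod(remaining, n_base_states)
--         digits.append(digit)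
--     digits.append(remaining)
--     return tuple(reversed(digits))
-- ===== Notes on version B (the rewrite author's own statement) =====
-- stated objective: faster
-- what changed: Replaces the loop that recomputes n_base_states**(order-1-i) and floor-divides the running remainder by it with a least-significant-first divmod base conversion (digits reversed at the end); Pre_ excludes order >= 2 with non-positive n_base_states, where A either raises ZeroDivisionError (base 0) or returns digits that are artefacts of dividing by alternating-sign powers of a meaningless state count.
-- outside the precondition, e.g. on decode_expanded_state(-29, 3, -5): A returns (-2, -5, -4), B returns (-1, 0, -4)
import Mathlib
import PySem

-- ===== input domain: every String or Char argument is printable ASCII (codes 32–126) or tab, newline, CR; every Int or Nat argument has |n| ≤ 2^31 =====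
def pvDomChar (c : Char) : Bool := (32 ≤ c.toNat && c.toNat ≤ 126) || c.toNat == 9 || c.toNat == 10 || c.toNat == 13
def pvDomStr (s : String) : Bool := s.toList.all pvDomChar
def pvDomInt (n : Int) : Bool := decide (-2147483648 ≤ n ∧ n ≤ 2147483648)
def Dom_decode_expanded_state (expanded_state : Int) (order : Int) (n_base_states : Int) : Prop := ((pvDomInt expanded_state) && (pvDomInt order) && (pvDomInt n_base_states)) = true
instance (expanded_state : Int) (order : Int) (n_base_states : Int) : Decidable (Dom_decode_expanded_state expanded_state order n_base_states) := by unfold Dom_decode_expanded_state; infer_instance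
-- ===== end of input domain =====

-- B replaces A's loop over precomputed powers n**(order-1-i) by a least-significant-first
-- divmod base conversion (digits reversed at the end); equivalence is proved on Pre_
-- (positive base, or order ≤ 1).

-- ===== PORT A =====
def decode_expanded_state (expanded_state : Int) (order : Int) (n_base_states : Int) : List Int :=
  ((PySem.List.pyRange 0 order 1).foldl
    (fun (acc : List Int × Int) i =>
      -- power = n_base_states ** (order - 1 - i); the exponent is ≥ 0 for every i in range(order),
      -- so `.toNat` is exact here
      let power := n_base_states ^ (order - 1 - i).toNat
      (acc.1 ++ [PySem.Int.floordiv acc.2 power], PySem.Int.mod acc.2 power))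
    (([] : List Int), expanded_state)).1

-- ===== PORT B =====
-- the `for _ in range(order-1)` loop of Source B: state = (remaining, digits)
def pvAltLoop (n : Int) : Nat → Int → List Int → Int × List Int
  | 0, remaining, digits => (remaining, digits)
  | k+1, remaining, digits =>
      pvAltLoop n k (PySem.Int.floordiv remaining n) (digits ++ [PySem.Int.mod remaining n])

def decode_expanded_state_alt (expanded_state : Int) (order : Int) (n_base_states : Int) : List Int :=
  if order ≤ 0 then []
  else
    let p := pvAltLoop n_base_states (order - 1).toNat expanded_state []
    (p.2 ++ [p.1]).reverse

-- ===== PRECONDITION & SPEC =====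
-- Pre_ keeps the natural domain: a positive number of base states (any order), plus all order ≤ 1
-- (where both programs agree for every base).  For order ≥ 2 it excludes n_base_states = 0, where A
-- raises ZeroDivisionError (and B too), and negative n_base_states — a meaningless state count, where
-- A's digit values are artefacts of floor-dividing by alternating-sign powers and B's divmod chain
-- returns equally arbitrary but different digits.
def Pre_decode_expanded_state (expanded_state : Int) (order : Int) (n_base_states : Int) : Prop :=
  1 ≤ n_base_states ∨ order ≤ 1
instance (expanded_state : Int) (order : Int) (n_base_states : Int) : Decidable (Pre_decode_expanded_state expanded_state order n_base_states) := by unfold Pre_decode_expanded_state; infer_instance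

def pvWitness_decode_expanded_state : Int × Int × Int := (29, 3, 3)

def Spec_decode_expanded_state (expanded_state : Int) (order : Int) (n_base_states : Int) (out : List Int) : Prop := out = decode_expanded_state_alt expanded_state order n_base_states
instance (expanded_state : Int) (order : Int) (n_base_states : Int) (out : List Int) : Decidable (Spec_decode_expanded_state expanded_state order n_base_states out) := by unfold Spec_decode_expanded_state; infer_instance

-- ===== CLAIM (what is proved, stated in full; the proofs are below) =====
def Claim_equal_decode_expanded_state : Prop := ∀ (expanded_state : Int) (order : Int) (n_base_states : Int), Dom_decode_expanded_state expanded_state order n_base_states → Pre_decode_expanded_state expanded_state order n_base_states → Spec_decode_expanded_state expanded_state order n_base_states (decode_expanded_state expanded_state order n_base_states)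

-- ===== LEMMAS AND PROOFS =====

-- MSB-first recursion computing A's digit list: with k digits left, the power is n^(k-1)
def pvArec (n : Int) : Nat → Int → List Int
  | 0, _ => []
  | k+1, x => PySem.Int.floordiv x (n ^ k) :: pvArec n k (PySem.Int.mod x (n ^ k))

-- A's fold over range(a, order) equals pvArec on the remaining (order - a) digits
theorem pv_fold_eq_arec (n : Int) : ∀ (k : Nat) (a order : Int), order - a = (k : Int) →
    ∀ (x : Int) (acc : List Int),
    ((PySem.List.pyRange a order 1).foldl
      (fun (st : List Int × Int) i =>
        let power := n ^ (order - 1 - i).toNat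
        (st.1 ++ [PySem.Int.floordiv st.2 power], PySem.Int.mod st.2 power))
      (acc, x)).1 = acc ++ pvArec n k x := by
  intro k
  induction k with
  | zero =>
      intro a order h x acc
      have ha : order = a := by omega
      subst ha
      simp [pvArec]
  | succ k ih =>
      intro a order h x acc
      have hab : a < order := by omega
      rw [PySem.List.pyRange_one_cons hab, List.foldl_cons]
      have he : (order - 1 - a).toNat = k := by omega
      have h' : order - (a + 1) = (k : Int) := by omega
      simp only [he]
      rw [ih (a + 1) order h']
      simp [pvArec]

-- arithmetic identities for floor division by a positive base
theorem pv_I1 (x n m : Int) (hn : 0 < n) (hm : 0 < m) :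
    PySem.Int.floordiv x (n * m) = PySem.Int.floordiv (PySem.Int.floordiv x n) m := by
  rw [PySem.Int.floordiv_eq_ediv_of_pos (mul_pos hn hm),
      PySem.Int.floordiv_eq_ediv_of_pos hn,
      PySem.Int.floordiv_eq_ediv_of_pos hm,
      Int.ediv_ediv_of_nonneg hn.le]

theorem pv_I2 (x n m : Int) (hn : 0 < n) (hm : 0 < m) :
    PySem.Int.floordiv (PySem.Int.mod x (n * m)) n = PySem.Int.mod (PySem.Int.floordiv x n) m := by
  rw [PySem.Int.mod_eq_emod_of_pos (mul_pos hn hm),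
      PySem.Int.floordiv_eq_ediv_of_pos hn,
      PySem.Int.floordiv_eq_ediv_of_pos hn,
      PySem.Int.mod_eq_emod_of_pos hm]
  rw [Int.emod_def, Int.emod_def, ← Int.ediv_ediv_of_nonneg hn.le]
  have h : x - n * m * (x / n / m) = x + -(m * (x / n / m)) * n := by ring
  rw [h, Int.add_mul_ediv_right _ _ hn.ne']
  ring

theorem pv_I3 (x n m : Int) (hn : 0 < n) (hm : 0 < m) :
    PySem.Int.mod (PySem.Int.mod x (n * m)) n = PySem.Int.mod x n := by
  rw [PySem.Int.mod_eq_emod_of_pos (mul_pos hn hm), PySem.Int.mod_eq_emod_of_pos hn,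
      PySem.Int.mod_eq_emod_of_pos hn]
  exact Int.emod_emod_of_dvd x (dvd_mul_right n m)

-- peel the least-significant digit off A's MSB-first recursion
theorem pv_arec_peel (n : Int) (hn : 1 ≤ n) : ∀ (k : Nat) (x : Int),
    pvArec n (k + 2) x = pvArec n (k + 1) (PySem.Int.floordiv x n) ++ [PySem.Int.mod x n] := by
  intro k
  induction k with
  | zero =>
      intro x
      simp [pvArec]
  | succ k ih =>
      intro x
      have hpos : (0 : Int) < n := hn
      have hmpos : (0 : Int) < n ^ (k + 1) := pow_pos hpos _
      have hpow : n ^ (k + 2) = n * n ^ (k + 1) := by ring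
      show PySem.Int.floordiv x (n ^ (k + 2)) :: pvArec n (k + 2) (PySem.Int.mod x (n ^ (k + 2)))
        = PySem.Int.floordiv (PySem.Int.floordiv x n) (n ^ (k + 1)) ::
          pvArec n (k + 1) (PySem.Int.mod (PySem.Int.floordiv x n) (n ^ (k + 1))) ++ [PySem.Int.mod x n]
      rw [ih (PySem.Int.mod x (n ^ (k + 2)))]
      rw [hpow, pv_I1 x n (n ^ (k + 1)) hpos hmpos, pv_I2 x n (n ^ (k + 1)) hpos hmpos,
          pv_I3 x n (n ^ (k + 1)) hpos hmpos]
      simp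

-- LSB-first digits and final quotient of B's divmod chain
def pvBdig (n : Int) : Nat → Int → List Int
  | 0, _ => []
  | k+1, x => PySem.Int.mod x n :: pvBdig n k (PySem.Int.floordiv x n)

def pvBquot (n : Int) : Nat → Int → Int
  | 0, x => x
  | k+1, x => pvBquot n k (PySem.Int.floordiv x n)

theorem pv_altLoop_eq (n : Int) : ∀ (k : Nat) (x : Int) (ds : List Int),
    pvAltLoop n k x ds = (pvBquot n k x, ds ++ pvBdig n k x) := by
  intro k
  induction k with
  | zero => intro x ds; simp [pvAltLoop, pvBquot, pvBdig]
  | succ k ih => intro x ds; simp [pvAltLoop, pvBquot, pvBdig, ih]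

-- A's digits are B's quotient followed by B's reversed low digits
theorem pv_arec_eq (n : Int) (hn : 1 ≤ n) : ∀ (k : Nat) (x : Int),
    pvArec n (k + 1) x = pvBquot n k x :: (pvBdig n k x).reverse := by
  intro k
  induction k with
  | zero => intro x; simp [pvArec, pvBquot, pvBdig]
  | succ k ih =>
      intro x
      rw [pv_arec_peel n hn k x, ih (PySem.Int.floordiv x n)]
      simp [pvBquot, pvBdig]

theorem decode_eq_arec (expanded_state order n : Int) (h : 0 ≤ order) :
    decode_expanded_state expanded_state order n = pvArec n order.toNat expanded_state := by
  unfold decode_expanded_state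
  have := pv_fold_eq_arec n order.toNat 0 order (by omega) expanded_state []
  simpa using this

-- ===== VERDICT (by name: the statement is the Claim_ definition above) =====
theorem decode_expanded_state_spec : Claim_equal_decode_expanded_state := by
  intro x order n _ hpre
  unfold Spec_decode_expanded_state
  by_cases h0 : order ≤ 0
  · have hr : (PySem.List.pyRange 0 order 1) = [] := by
      rw [PySem.List.pyRange_one]
      have h2 : (order - 0).toNat = 0 := by omega
      rw [h2]
      simp
    unfold decode_expanded_state decode_expanded_state_alt
    rw [hr, if_pos h0]
    simp
  · -- order ≥ 1
    by_cases h1 : order = 1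
    · subst h1
      rw [decode_eq_arec x 1 n (by omega)]
      simp [decode_expanded_state_alt, pvAltLoop, pvArec]
    · -- order ≥ 2, so Pre_ gives 1 ≤ n
      have hn : 1 ≤ n := by
        rcases hpre with h | h
        · exact h
        · omega
      have hk : order.toNat = (order - 1).toNat + 1 := by omega
      rw [decode_eq_arec x order n (by omega), hk,
          pv_arec_eq n hn (order - 1).toNat x]
      unfold decode_expanded_state_alt
      rw [if_neg h0]
      simp [pv_altLoop_eq]
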